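-- pv_equiv track=rewrite | github.com/joemeyer1/Monte-Carlo | monte_carlo.py | pre_visited
-- ===== SOURCE A (Python) =====
-- def pre_visited(episode, state, action):
-- 	i = 0
-- 	while i < len(episode) - 1:
-- 		if episode[i] == state:
-- 			if episode[i+1] == action:
-- 				return True
-- 		i += 3
-- 	return False
-- ===== SOURCE B (Python) =====
-- def pre_visited(episode, state, action):
-- 	states = episode[::3]
-- 	actions = episode[1::3]
-- 	return (state, action) in zip(states, actions)
-- ===== Notes on version B (the rewrite author's own statement) =====
-- stated objective: idiomatic
-- what changed: The explicit index-stepping while loop is replaced by building two strided slices episode[::3] (states) and episode[1::3] (actions), zipping them into (state, action) pairs and membership-testing the pair; zip's truncation to the shorter slice reproduces the i < len-1 bound.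
import Mathlib
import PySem

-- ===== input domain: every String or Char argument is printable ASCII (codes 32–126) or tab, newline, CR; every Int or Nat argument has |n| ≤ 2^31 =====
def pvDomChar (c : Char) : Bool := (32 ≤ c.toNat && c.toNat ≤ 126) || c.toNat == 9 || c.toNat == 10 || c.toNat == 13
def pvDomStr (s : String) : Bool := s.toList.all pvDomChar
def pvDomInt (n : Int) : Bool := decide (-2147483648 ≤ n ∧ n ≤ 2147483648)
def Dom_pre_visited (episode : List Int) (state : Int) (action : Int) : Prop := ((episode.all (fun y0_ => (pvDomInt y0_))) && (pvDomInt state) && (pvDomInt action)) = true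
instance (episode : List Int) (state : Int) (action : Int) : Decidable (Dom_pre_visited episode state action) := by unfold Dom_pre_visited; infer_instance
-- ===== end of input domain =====

-- B replaces A's index-stepping while loop by two strided slices episode[::3] and episode[1::3],
-- zipped into (state, action) pairs and membership-tested (objective: idiomatic; same O(n) cost).

-- ===== PORT A =====
-- A's while loop: i starts at 0 and steps by 3 while i < len(episode) - 1
def preVisitedLoop (episode : List Int) (state : Int) (action : Int) (i : Nat) : Bool :=
  if h : (i : Int) < (episode.length : Int) - 1 then
    -- episode[i] / episode[i+1]: here 0 ≤ i and i+1 < len(episode), so indexing is in range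
    -- and getD is exact (Python would raise only out of range, which cannot happen)
    if episode.getD i 0 = state then
      if episode.getD (i + 1) 0 = action then true
      else preVisitedLoop episode state action (i + 3)
    else preVisitedLoop episode state action (i + 3)
  else false
termination_by episode.length - i
decreasing_by all_goals omega

def pre_visited (episode : List Int) (state : Int) (action : Int) : Bool :=
  preVisitedLoop episode state action 0

-- ===== PORT B =====
-- Source B: states = episode[::3]; actions = episode[1::3]; (state, action) in zip(states, actions).
-- The step literal 3 is nonzero, so slice? is always some and getD [] is exact.
def pre_visited_alt (episode : List Int) (state : Int) (action : Int) : Bool :=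
  let states := (PySem.List.slice? episode none none 3).getD []
  let actions := (PySem.List.slice? episode (some 1) none 3).getD []
  (states.zip actions).contains (state, action)

-- ===== PRECONDITION & SPEC =====
def Spec_pre_visited (episode : List Int) (state : Int) (action : Int) (out : Bool) : Prop := out = pre_visited_alt episode state action
instance (episode : List Int) (state : Int) (action : Int) (out : Bool) : Decidable (Spec_pre_visited episode state action out) := by unfold Spec_pre_visited; infer_instance

-- ===== CLAIM (what is proved, stated in full; the proofs are below) =====
def Claim_equal_pre_visited : Prop := ∀ (episode : List Int) (state : Int) (action : Int), Dom_pre_visited episode state action → Spec_pre_visited episode state action (pre_visited episode state action)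

-- ===== LEMMAS AND PROOFS =====

-- episode[::3] is the map over a range of strided getD lookups
lemma slice3_zero (xs : List Int) :
    (PySem.List.slice? xs none none 3).getD [] =
      (List.range (((xs.length : Int) + 2) / 3).toNat).map (fun k => xs.getD (3 * k) 0) := by
  simp only [PySem.List.slice?, PySem.List.sliceIndices]
  norm_num
  have hc : (if 0 < xs.length then (((xs.length : Int) + 3 - 1) / 3).toNat else 0)
      = (((xs.length : Int) + 2) / 3).toNat := by split <;> omega
  rw [hc]
  rw [List.filterMap_congr (g := fun k => some (xs[3*k]?.getD 0)) ?_]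
  · exact congrFun List.filterMap_eq_map _
  · intro k hk
    simp only [List.mem_range] at hk
    have h3 : 3 * k < xs.length := by omega
    have ht : ((3 : Int) * (k : Int)).toNat = 3 * k := by omega
    rw [ht]
    simp [List.getElem?_eq_getElem h3]

-- episode[1::3] likewise, offset by one
lemma slice3_one (xs : List Int) :
    (PySem.List.slice? xs (some 1) none 3).getD [] =
      (List.range (((xs.length : Int) + 1) / 3).toNat).map (fun k => xs.getD (3 * k + 1) 0) := by
  simp only [PySem.List.slice?, PySem.List.sliceIndices]
  norm_num
  have hc : (if 1 < xs.length then (((xs.length : Int) - min 1 (xs.length : Int) + 3 - 1) / 3).toNat else 0)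
      = (((xs.length : Int) + 1) / 3).toNat := by split <;> omega
  rw [hc]
  rw [List.filterMap_congr (g := fun k => some (xs[3*k+1]?.getD 0)) ?_]
  · exact congrFun List.filterMap_eq_map _
  · intro k hk
    simp only [List.mem_range] at hk
    have h3 : 3 * k + 1 < xs.length := by omega
    have ht : ((min 1 (xs.length : Int)) + 3 * (k : Int)).toNat = 3 * k + 1 := by omega
    rw [ht]
    simp [List.getElem?_eq_getElem h3]

-- membership in the zip of two range-maps is a positional existential
lemma mem_zip_map_range (f g : Nat → Int) (n m : Nat) (s a : Int) :
    ((((List.range n).map f).zip ((List.range m).map g)).contains (s, a) = true) ↔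
      ∃ j : Nat, j < n ∧ j < m ∧ f j = s ∧ g j = a := by
  rw [List.contains_iff_mem, List.mem_iff_getElem]
  constructor
  · rintro ⟨i, hi, hEq⟩
    simp [List.length_zip] at hi
    refine ⟨i, hi.1, hi.2, ?_, ?_⟩ <;>
      · have := hEq
        rw [List.getElem_zip] at this
        simp at this
        tauto
  · rintro ⟨j, hn, hm, hf, hg⟩
    refine ⟨j, by simp [List.length_zip]; omega, ?_⟩
    rw [List.getElem_zip]; simp [hf, hg]

-- A's loop at index i returns true iff some strided pair from i on matches
lemma loopA_iff (xs : List Int) (s a : Int) (i : Nat) :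
    preVisitedLoop xs s a i = true ↔
      ∃ k : Nat, i + 3 * k + 1 < xs.length ∧
        xs.getD (i + 3 * k) 0 = s ∧ xs.getD (i + 3 * k + 1) 0 = a := by
  fun_induction preVisitedLoop xs s a i with
  | case1 i h hs ha =>
      simp only [true_iff]
      exact ⟨0, by omega, by simpa using hs, by simpa using ha⟩
  | case2 i h hs ha ih =>
      rw [ih]
      constructor
      · rintro ⟨k, hk, h1, h2⟩
        exact ⟨k + 1, by omega, by rw [← h1]; ring_nf, by rw [← h2]; ring_nf⟩
      · rintro ⟨k, hk, h1, h2⟩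
        match k with
        | 0 => exact absurd (by simpa using h2) ha
        | k + 1 => exact ⟨k, by omega, by rw [← h1]; ring_nf, by rw [← h2]; ring_nf⟩
  | case3 i h hs ih =>
      rw [ih]
      constructor
      · rintro ⟨k, hk, h1, h2⟩
        exact ⟨k + 1, by omega, by rw [← h1]; ring_nf, by rw [← h2]; ring_nf⟩
      · rintro ⟨k, hk, h1, h2⟩
        match k with
        | 0 => exact absurd (by simpa using h1) hs
        | k + 1 => exact ⟨k, by omega, by rw [← h1]; ring_nf, by rw [← h2]; ring_nf⟩
  | case4 i h =>
      simp only [Bool.false_eq_true, false_iff]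
      rintro ⟨k, hk, -, -⟩
      omega

-- ===== VERDICT (by name: the statement is the Claim_ definition above) =====
theorem pre_visited_spec : Claim_equal_pre_visited := by
  intro episode state action _
  unfold Spec_pre_visited pre_visited pre_visited_alt
  rw [slice3_zero, slice3_one, Bool.eq_iff_iff, loopA_iff, mem_zip_map_range]
  constructor
  · rintro ⟨k, hk, hs, ha⟩
    exact ⟨k, by omega, by omega, by simpa using hs, by simpa using ha⟩
  · rintro ⟨j, hn, hm, hf, hg⟩
    exact ⟨j, by omega, by simpa using hf, by simpa using hg⟩
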